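-- pv_equiv track=rewrite | github.com/lazyxiaoming/Leetcode | 160_Intersection_of_Two_Linked_Lists/my_solution.py | findcommonsublist
-- ===== SOURCE A (Python) =====
-- def findcommonsublist(list1, list2):
--     if not list1 or not list2:
--         return None
--     if list1[-1] != list2[-1]:
--         return None
--     index = -1
--     while list1[index] == list2[index]:
--         index -= 1
--         try:
--             list1[index]
--             list2[index]
--         except:
--             break
--     return index + 1
-- ===== SOURCE B (Python) =====
-- def findcommonsublist(list1, list2):
--     if not list1 or not list2:
--         return None
--     lo, hi = 0, min(len(list1), len(list2))
--     while lo < hi: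
--         mid = (lo + hi + 1) // 2
--         if list1[-mid:] == list2[-mid:]:
--             lo = mid
--         else:
--             hi = mid - 1
--     return -lo if lo else None
-- ===== Notes on version B (the rewrite author's own statement) =====
-- stated objective: alternative
-- what changed: B computes the common-suffix length by binary search on the answer (the predicate 'the last k elements are equal' is monotone, checked with a single slice comparison per probe), instead of A's element-by-element backward scan with a negative index and exception-based bounds handling; it then returns -length, or None when the length is 0 or a list is empty.
import Mathlib
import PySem

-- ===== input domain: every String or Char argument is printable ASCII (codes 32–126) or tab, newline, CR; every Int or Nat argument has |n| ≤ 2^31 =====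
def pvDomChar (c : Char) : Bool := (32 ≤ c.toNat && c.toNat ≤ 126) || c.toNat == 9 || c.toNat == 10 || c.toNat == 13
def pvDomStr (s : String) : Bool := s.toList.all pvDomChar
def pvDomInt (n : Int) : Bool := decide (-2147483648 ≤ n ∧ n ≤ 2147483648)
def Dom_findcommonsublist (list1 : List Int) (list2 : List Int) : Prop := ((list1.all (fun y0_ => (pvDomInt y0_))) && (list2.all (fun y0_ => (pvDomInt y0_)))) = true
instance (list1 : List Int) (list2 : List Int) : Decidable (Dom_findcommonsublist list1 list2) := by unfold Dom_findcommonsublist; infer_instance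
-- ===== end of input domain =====

-- B finds the common-suffix length by BINARY SEARCH on the answer (the predicate
-- 'the last k elements are equal' is monotone), instead of A's element-by-element
-- backward scan with exception-based bounds handling; same outputs (alternative).

-- ===== PORT A =====
-- the while loop of A: state is the (negative) index; fuel bounds the iteration count
def findcommonsublistLoop (l1 l2 : List Int) : Nat → Int → Int
  | 0, index => index
  | fuel+1, index =>
    match PySem.List.pyGet? l1 index, PySem.List.pyGet? l2 index with
    | some a, some b =>
      if a = b then
        let index' := index - 1
        -- 'try: list1[index]; list2[index]; except: break'
        if (PySem.List.pyGet? l1 index').isSome && (PySem.List.pyGet? l2 index').isSome then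
          findcommonsublistLoop l1 l2 fuel index'
        else index'
      else index
    | _, _ => index  -- unreachable on the states A's code produces

def findcommonsublist (list1 : List Int) (list2 : List Int) : Option Int :=
  if list1 = [] ∨ list2 = [] then none
  else if PySem.List.pyGet? list1 (-1) ≠ PySem.List.pyGet? list2 (-1) then none
  else some (findcommonsublistLoop list1 list2 (list1.length + list2.length) (-1) + 1)

-- ===== PORT B =====
-- 'while lo < hi: mid = (lo+hi+1)//2; if list1[-mid:] == list2[-mid:]: lo = mid else: hi = mid-1'
-- lo/hi stay nonnegative in Source B, so Nat state; fuel bounds the iteration count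
def findcommonsublistSearch (l1 l2 : List Int) : Nat → Nat → Nat → Nat
  | 0, lo, _ => lo
  | fuel+1, lo, hi =>
    if lo < hi then
      let mid := (lo + hi + 1) / 2
      if PySem.List.slice l1 (some (-(mid : Int))) none
           = PySem.List.slice l2 (some (-(mid : Int))) none then
        findcommonsublistSearch l1 l2 fuel mid hi
      else
        findcommonsublistSearch l1 l2 fuel lo (mid - 1)
    else lo

def findcommonsublist_alt (list1 : List Int) (list2 : List Int) : Option Int :=
  if list1 = [] ∨ list2 = [] then none
  else
    let hi := min list1.length list2.length
    let lo := findcommonsublistSearch list1 list2 (hi + 1) 0 hi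
    if lo ≠ 0 then some (-(lo : Int)) else none

-- ===== PRECONDITION & SPEC =====
def Spec_findcommonsublist (list1 : List Int) (list2 : List Int) (out : Option Int) : Prop := out = findcommonsublist_alt list1 list2
instance (list1 : List Int) (list2 : List Int) (out : Option Int) : Decidable (Spec_findcommonsublist list1 list2 out) := by unfold Spec_findcommonsublist; infer_instance

-- ===== CLAIM (what is proved, stated in full; the proofs are below) =====
def Claim_equal_findcommonsublist : Prop := ∀ (list1 : List Int) (list2 : List Int), Dom_findcommonsublist list1 list2 → Spec_findcommonsublist list1 list2 (findcommonsublist list1 list2)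

-- ===== LEMMAS AND PROOFS =====

-- the count of equal leading pairs (= common-suffix length of the originals on the reverses)
def ceq : List Int → List Int → Nat
  | a :: as, b :: bs => if a = b then ceq as bs + 1 else 0
  | _, _ => 0

theorem ceq_le_left (r1 r2 : List Int) : ceq r1 r2 ≤ r1.length := by
  induction r1 generalizing r2 with
  | nil => simp [ceq]
  | cons a as ih =>
    cases r2 with
    | nil => simp [ceq]
    | cons b bs =>
      by_cases hab : a = b
      · simp only [ceq, if_pos hab, List.length_cons]
        exact Nat.succ_le_succ (ih bs)
      · simp [ceq, hab]

theorem ceq_le_right (r1 r2 : List Int) : ceq r1 r2 ≤ r2.length := by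
  induction r1 generalizing r2 with
  | nil => simp [ceq]
  | cons a as ih =>
    cases r2 with
    | nil => simp [ceq]
    | cons b bs =>
      by_cases hab : a = b
      · simp only [ceq, if_pos hab, List.length_cons]
        exact Nat.succ_le_succ (ih bs)
      · simp [ceq, hab]

theorem ceq_get_eq (r1 r2 : List Int) (i : Nat) (h : i < ceq r1 r2) :
    r1[i]? = r2[i]? ∧ (r1[i]?).isSome := by
  induction r1 generalizing r2 i with
  | nil => simp [ceq] at h
  | cons a as ih =>
    cases r2 with
    | nil => simp [ceq] at h
    | cons b bs =>
      by_cases hab : a = b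
      · cases i with
        | zero => simp [hab]
        | succ i =>
          simp only [ceq, if_pos hab] at h
          simpa using ih bs i (by omega)
      · simp [ceq, hab] at h

theorem ceq_get_ne (r1 r2 : List Int) (h1 : ceq r1 r2 < r1.length) (h2 : ceq r1 r2 < r2.length) :
    r1[ceq r1 r2]? ≠ r2[ceq r1 r2]? := by
  induction r1 generalizing r2 with
  | nil => simp at h1
  | cons a as ih =>
    cases r2 with
    | nil => simp at h2
    | cons b bs =>
      by_cases hab : a = b
      · simp only [ceq, if_pos hab] at h1 h2 ⊢
        exact fun h => ih bs (by simpa using h1) (by simpa using h2) (by simpa using h)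
      · simp [ceq, hab]

-- take m agrees exactly up to ceq
theorem ceq_take (r1 r2 : List Int) (m : Nat) (h1 : m ≤ r1.length) (h2 : m ≤ r2.length) :
    (r1.take m = r2.take m) ↔ m ≤ ceq r1 r2 := by
  induction r1 generalizing r2 m with
  | nil => cases m <;> simp_all
  | cons a as ih =>
    cases r2 with
    | nil => cases m <;> simp_all
    | cons b bs =>
      cases m with
      | zero => simp
      | succ m =>
        by_cases hab : a = b
        · have hc : ceq (a :: as) (b :: bs) = ceq as bs + 1 := by simp [ceq, hab]
          rw [hc]
          simp only [List.take_succ_cons, List.cons.injEq, hab, true_and]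
          rw [ih bs m (by simpa using h1) (by simpa using h2)]
          omega
        · have hc : ceq (a :: as) (b :: bs) = 0 := by simp [ceq, hab]
          rw [hc]
          simp only [List.take_succ_cons, List.cons.injEq]
          constructor
          · rintro ⟨h, -⟩; exact absurd h hab
          · omega

-- bridge: negative python index into the reversed list
theorem pyGet_rev (l : List Int) (j : Nat) (h : 1 ≤ j) :
    PySem.List.pyGet? l (-(j : Int)) = l.reverse[j-1]? := by
  by_cases hj : j ≤ l.length
  · rw [PySem.List.pyGet?_neg_natCast l j (by omega) hj,
        List.getElem?_reverse (by omega)]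
    congr 1
    omega
  · rw [List.getElem?_eq_none (by simp; omega),
        PySem.List.pyGet?_eq_none_iff]
    simp [PySem.Raise.InRange]
    omega

-- bridge: l[-m:] (1 ≤ m ≤ len) equality ↔ take m on the reverses agree
theorem slice_suffix_eq (l1 l2 : List Int) (m : Nat) (hm : 1 ≤ m) :
    (PySem.List.slice l1 (some (-(m : Int))) none
      = PySem.List.slice l2 (some (-(m : Int))) none)
      ↔ (l1.reverse.take m = l2.reverse.take m) := by
  rw [PySem.List.slice_from_neg_natCast l1 m (by omega),
      PySem.List.slice_from_neg_natCast l2 m (by omega)]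
  have e1 : l1.drop (l1.length - m) = (l1.reverse.take m).reverse := by
    simpa [List.rtake] using List.rtake_eq_reverse_take_reverse (l := l1) (n := m)
  have e2 : l2.drop (l2.length - m) = (l2.reverse.take m).reverse := by
    simpa [List.rtake] using List.rtake_eq_reverse_take_reverse (l := l2) (n := m)
  rw [e1, e2]
  exact ⟨fun h => List.reverse_injective h, fun h => by rw [h]⟩

-- binary-search invariant: with K between lo and hi, the search converges to K
theorem search_eq (l1 l2 : List Int) (fuel lo hi : Nat)
    (hloK : lo ≤ ceq l1.reverse l2.reverse) (hKhi : ceq l1.reverse l2.reverse ≤ hi)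
    (hhi : hi ≤ min l1.length l2.length) (hfuel : hi - lo ≤ fuel) :
    findcommonsublistSearch l1 l2 fuel lo hi = ceq l1.reverse l2.reverse := by
  induction fuel generalizing lo hi with
  | zero => simp only [findcommonsublistSearch]; omega
  | succ fuel ih =>
    simp only [findcommonsublistSearch]
    by_cases hlh : lo < hi
    · rw [if_pos hlh]
      have hmid1 : 1 ≤ (lo + hi + 1) / 2 := by omega
      have hmidle : (lo + hi + 1) / 2 ≤ hi := by omega
      have hslice := slice_suffix_eq l1 l2 ((lo + hi + 1) / 2) hmid1
      have htake := ceq_take l1.reverse l2.reverse ((lo + hi + 1) / 2)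
        (by simp; omega) (by simp; omega)
      by_cases hs : PySem.List.slice l1 (some (-(((lo + hi + 1) / 2 : Nat) : Int))) none
          = PySem.List.slice l2 (some (-(((lo + hi + 1) / 2 : Nat) : Int))) none
      · rw [if_pos hs]
        have : (lo + hi + 1) / 2 ≤ ceq l1.reverse l2.reverse :=
          htake.mp (hslice.mp hs)
        exact ih _ _ this hKhi hhi (by omega)
      · rw [if_neg hs]
        have : ¬ (lo + hi + 1) / 2 ≤ ceq l1.reverse l2.reverse :=
          fun h => hs (hslice.mpr (htake.mpr h))
        exact ih _ _ hloK (by omega) (by omega) (by omega)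
    · rw [if_neg hlh]; omega

theorem loop_eq (l1 l2 : List Int) (fuel j : Nat)
    (hj1 : 1 ≤ j) (hjk : j ≤ ceq l1.reverse l2.reverse + 1)
    (hj2 : j ≤ l1.length) (hj3 : j ≤ l2.length)
    (hfuel : ceq l1.reverse l2.reverse + 2 - j ≤ fuel) :
    findcommonsublistLoop l1 l2 fuel (-(j : Int)) = -((ceq l1.reverse l2.reverse : Int) + 1) := by
  induction fuel generalizing j with
  | zero => omega
  | succ fuel ih =>
    have hk1 : ceq l1.reverse l2.reverse ≤ l1.length := by
      simpa using ceq_le_left l1.reverse l2.reverse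
    have hk2 : ceq l1.reverse l2.reverse ≤ l2.length := by
      simpa using ceq_le_right l1.reverse l2.reverse
    obtain ⟨a, ha⟩ : ∃ a, PySem.List.pyGet? l1 (-(j:Int)) = some a := by
      rw [pyGet_rev l1 j hj1]
      exact ⟨_, List.getElem?_eq_getElem (by simp; omega)⟩
    obtain ⟨b, hb⟩ : ∃ b, PySem.List.pyGet? l2 (-(j:Int)) = some b := by
      rw [pyGet_rev l2 j hj1]
      exact ⟨_, List.getElem?_eq_getElem (by simp; omega)⟩
    simp only [findcommonsublistLoop, ha, hb]
    have hidx : (-(j:Int)) - 1 = -(((j+1 : Nat) : Int)) := by push_cast; ring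
    by_cases hab : a = b
    · have hjle : j ≤ ceq l1.reverse l2.reverse := by
        by_contra hcon
        have hne := ceq_get_ne l1.reverse l2.reverse (by simp; omega) (by simp; omega)
        rw [pyGet_rev l1 j hj1] at ha
        rw [pyGet_rev l2 j hj1] at hb
        have hj' : j - 1 = ceq l1.reverse l2.reverse := by omega
        rw [hj'] at ha hb
        exact hne (by rw [ha, hb, hab])
      rw [if_pos hab, hidx]
      by_cases hin : j + 1 ≤ l1.length ∧ j + 1 ≤ l2.length
      · have hs1 : (PySem.List.pyGet? l1 (-(((j+1 : Nat)) : Int))).isSome = true := by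
          rw [pyGet_rev l1 (j+1) (by omega), List.getElem?_eq_getElem (by simp; omega)]
          rfl
        have hs2 : (PySem.List.pyGet? l2 (-(((j+1 : Nat)) : Int))).isSome = true := by
          rw [pyGet_rev l2 (j+1) (by omega), List.getElem?_eq_getElem (by simp; omega)]
          rfl
        rw [if_pos (by rw [hs1, hs2]; rfl)]
        exact ih (j+1) (by omega) (by omega) hin.1 hin.2 (by omega)
      · have hnone : ¬ (((PySem.List.pyGet? l1 (-(((j+1 : Nat)) : Int))).isSome && (PySem.List.pyGet? l2 (-(((j+1 : Nat)) : Int))).isSome) = true) := by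
          rcases Nat.lt_or_ge l1.length (j+1) with h1 | h1
          · have hn : PySem.List.pyGet? l1 (-(((j+1 : Nat)) : Int)) = none := by
              rw [pyGet_rev l1 (j+1) (by omega)]
              exact List.getElem?_eq_none (by simp; omega)
            rw [hn]
            simp
          · have h2 : l2.length < j+1 := by omega
            have hn : PySem.List.pyGet? l2 (-(((j+1 : Nat)) : Int)) = none := by
              rw [pyGet_rev l2 (j+1) (by omega)]
              exact List.getElem?_eq_none (by simp; omega)
            rw [hn]
            simp
        rw [if_neg hnone]
        have hjk' : j = ceq l1.reverse l2.reverse := by omega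
        push_cast
        omega
    · rw [if_neg hab]
      have hj' : j = ceq l1.reverse l2.reverse + 1 := by
        by_contra hcon
        obtain ⟨heq, -⟩ := ceq_get_eq l1.reverse l2.reverse (j-1) (by omega)
        rw [pyGet_rev l1 j hj1] at ha
        rw [pyGet_rev l2 j hj1] at hb
        rw [ha, hb] at heq
        exact hab (by simpa using heq)
      rw [hj']
      push_cast
      ring

-- ===== VERDICT (by name: the statement is the Claim_ definition above) =====
theorem findcommonsublist_spec : Claim_equal_findcommonsublist := by
  unfold Claim_equal_findcommonsublist Spec_findcommonsublist
  intro l1 l2 _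
  unfold findcommonsublist findcommonsublist_alt
  by_cases hemp : l1 = [] ∨ l2 = []
  · rw [if_pos hemp, if_pos hemp]
  · rw [if_neg hemp, if_neg hemp]
    obtain ⟨h1, h2⟩ := not_or.mp hemp
    have hl1 : 1 ≤ l1.length := List.length_pos_of_ne_nil h1
    have hl2 : 1 ≤ l2.length := List.length_pos_of_ne_nil h2
    have hk1 : ceq l1.reverse l2.reverse ≤ l1.length := by
      simpa using ceq_le_left l1.reverse l2.reverse
    have hk2 : ceq l1.reverse l2.reverse ≤ l2.length := by
      simpa using ceq_le_right l1.reverse l2.reverse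
    have hsearch := search_eq l1 l2 (min l1.length l2.length + 1) 0
      (min l1.length l2.length) (by omega) (by omega) le_rfl (by omega)
    have hneg1 : (-1 : Int) = -((1:Nat):Int) := by norm_num
    obtain ⟨a, ha⟩ : ∃ a, l1.reverse[0]? = some a :=
      ⟨_, List.getElem?_eq_getElem (by simp; omega)⟩
    obtain ⟨b, hb⟩ : ∃ b, l2.reverse[0]? = some b :=
      ⟨_, List.getElem?_eq_getElem (by simp; omega)⟩
    have hga : PySem.List.pyGet? l1 (-1) = some a := by
      rw [hneg1, pyGet_rev l1 1 le_rfl]; simpa using ha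
    have hgb : PySem.List.pyGet? l2 (-1) = some b := by
      rw [hneg1, pyGet_rev l2 1 le_rfl]; simpa using hb
    simp only [hsearch]
    by_cases hab : a = b
    · have hkpos : 1 ≤ ceq l1.reverse l2.reverse := by
        cases hr1 : l1.reverse with
        | nil => rw [hr1] at ha; simp at ha
        | cons x xs =>
          cases hr2 : l2.reverse with
          | nil => rw [hr2] at hb; simp at hb
          | cons y ys =>
            rw [hr1] at ha; rw [hr2] at hb
            simp only [List.getElem?_cons_zero, Option.some.injEq] at ha hb
            subst ha; subst hb
            simp only [ceq, if_pos hab]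
            omega
      rw [if_neg (by simp [hga, hgb, hab]), hneg1,
        loop_eq l1 l2 (l1.length + l2.length) 1 le_rfl (by omega) hl1 hl2 (by omega),
        if_pos (by omega)]
      ring_nf
    · have hk0 : ceq l1.reverse l2.reverse = 0 := by
        cases hr1 : l1.reverse with
        | nil => simp [ceq]
        | cons x xs =>
          cases hr2 : l2.reverse with
          | nil => simp [ceq]
          | cons y ys =>
            rw [hr1] at ha; rw [hr2] at hb
            simp only [List.getElem?_cons_zero, Option.some.injEq] at ha hb
            subst ha; subst hb
            simp [ceq, hab]
      rw [if_pos (by simp [hga, hgb, hab]), if_neg (by omega)]
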